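-- pv_equiv track=rewrite | github.com/KukaTails/lightoys | leetcode/151.py | pre_treatment
-- ===== SOURCE A (Python) =====
-- def pre_treatment(words):
--     # remove leading
--     leading_end_pos = -1
--     for ch in words:
--         if ch == ' ': leading_end_pos += 1
--         else: break
--     words = words[leading_end_pos+1:]
--
--     # remove trailing
--     trailing_end_pos = len(words)
--     for i in range(len(words)-1, -1, -1):
--         if words[i] == ' ': trailing_end_pos -= 1
--         else: break
--     words = words[:trailing_end_pos]
--
--     if len(words) == 0: return words
--     statuses = ["InWord", "InWhiteSpace"]
--     i, status = 0, statuses[0]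
--     while i < len(words):
--         if status == statuses[0]:
--             if words[i] == ' ':
--                 status = statuses[1]
--             i += 1
--         else:
--             if words[i] == ' ':
--                 words.pop(i)
--             else:
--                 status = statuses[0]
--                 i += 1
--     return words
-- ===== SOURCE B (Python) =====
-- def pre_treatment(words):
--     # One pass: skip leading/repeated spaces while building a new list,
--     # then drop at most one leftover trailing space.
--     out = []
--     prev_space = True  # True also skips leading spaces
--     for ch in words:
--         if ch == ' ':
--             if not prev_space:
--                 out.append(ch)
--             prev_space = True
--         else:
--             out.append(ch)
--             prev_space = False
--     if out and out[-1] == ' ':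
--         out.pop()
--     return out
-- ===== Notes on version B (the rewrite author's own statement) =====
-- stated objective: faster
-- what changed: Replaced A's three passes (two trim scans with slicing plus a while loop that pops repeated spaces out of the list in place, quadratic) by a single left-to-right pass that builds a fresh list with a previous-was-space flag, followed by dropping at most one leftover trailing space.
import Mathlib
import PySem

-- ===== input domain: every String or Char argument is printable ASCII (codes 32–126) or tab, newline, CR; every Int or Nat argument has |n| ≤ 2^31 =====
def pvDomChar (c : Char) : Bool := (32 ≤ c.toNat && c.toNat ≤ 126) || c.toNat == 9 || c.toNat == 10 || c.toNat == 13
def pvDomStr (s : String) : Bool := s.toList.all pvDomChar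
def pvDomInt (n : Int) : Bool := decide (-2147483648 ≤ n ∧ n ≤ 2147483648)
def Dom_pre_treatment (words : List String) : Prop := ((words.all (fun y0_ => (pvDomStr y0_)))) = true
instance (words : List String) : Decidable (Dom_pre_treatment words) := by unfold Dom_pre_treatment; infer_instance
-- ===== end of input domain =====

-- B replaces A's trim-slice-and-pop passes (quadratic pops) by one left-to-right pass
-- building a fresh list, plus dropping at most one leftover trailing space (objective: faster).

-- ===== PORT A =====
-- 'for ch in words: if ch == " ": leading_end_pos += 1 else: break'
def pvLead : List String → Int → Int
  | [], acc => acc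
  | ch :: rest, acc => if ch = " " then pvLead rest (acc + 1) else acc

-- termination measures for the ports' loops (cited by the definitions below)
lemma pvTrailMeasure (i : Int) (h : 0 ≤ i) : (i - 1 + 1).toNat < (i + 1).toNat := by omega

lemma pvLoopMeasureStep (n i : Nat) (h : i < n) : n - (i + 1) < n - i := by omega

lemma pvLoopMeasurePop (words : List String) (i : Nat) (h : i < words.length) :
    (words.take i ++ words.drop (i + 1)).length - i < words.length - i := by
  rw [List.length_append, List.length_take, List.length_drop]
  omega

-- 'for i in range(len(words)-1, -1, -1): if words[i] == " ": trailing_end_pos -= 1 else: break'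
-- words[i] is always in range here (0 ≤ i < len), so List.getD is exact.
def pvTrail (words : List String) (i : Int) (tep : Int) : Int :=
  if h : 0 ≤ i then
    if words.getD i.toNat " " = " " then pvTrail words (i - 1) (tep - 1) else tep
  else tep
termination_by (i + 1).toNat
decreasing_by exact pvTrailMeasure i h

-- the while loop; 'words.pop(i)' is 'words.take i ++ words.drop (i+1)'; words[i] in range (guard i < len).
def pvLoopA (words : List String) (i : Nat) (status : String) : List String :=
  if h : i < words.length then
    if status = "InWord" then
      if words.getD i " " = " " then pvLoopA words (i + 1) "InWhiteSpace"
      else pvLoopA words (i + 1) status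
    else
      if words.getD i " " = " " then pvLoopA (words.take i ++ words.drop (i + 1)) i status
      else pvLoopA words (i + 1) "InWord"
  else words
termination_by words.length - i
decreasing_by
  · exact pvLoopMeasureStep words.length i h
  · exact pvLoopMeasureStep words.length i h
  · exact pvLoopMeasurePop words i h
  · exact pvLoopMeasureStep words.length i h

def pre_treatment (words : List String) : List String :=
  let leading_end_pos := pvLead words (-1)
  let words1 := PySem.List.slice words (some (leading_end_pos + 1)) none
  let trailing_end_pos := pvTrail words1 ((words1.length : Int) - 1) (words1.length : Int)
  let words2 := PySem.List.slice words1 none (some trailing_end_pos)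
  if words2.length = 0 then words2
  else pvLoopA words2 0 "InWord"

-- ===== PORT B =====
-- the body of 'for ch in words' with state (out, prev_space)
def pvStepB (acc : List String × Bool) (ch : String) : List String × Bool :=
  if ch = " " then
    (if acc.2 then acc.1 else acc.1 ++ [ch], true)
  else
    (acc.1 ++ [ch], false)

def pre_treatment_alt (words : List String) : List String :=
  let out := (words.foldl pvStepB ([], true)).1
  -- 'if out and out[-1] == " ": out.pop()'
  match out.getLast? with
  | some c => if c = " " then out.dropLast else out
  | none => out

-- ===== PRECONDITION & SPEC =====
def Spec_pre_treatment (words : List String) (out : List String) : Prop := out = pre_treatment_alt words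
instance (words : List String) (out : List String) : Decidable (Spec_pre_treatment words out) := by unfold Spec_pre_treatment; infer_instance

-- ===== CLAIM (what is proved, stated in full; the proofs are below) =====
def Claim_equal_pre_treatment : Prop := ∀ (words : List String), Dom_pre_treatment words → Spec_pre_treatment words (pre_treatment words)

-- ===== LEMMAS AND PROOFS =====

-- canonical single-pass collapse: p = "previous kept char was a space (or we are before any word)"
def pvGo : List String → Bool → List String
  | [], _ => []
  | c :: r, p => if c = " " then (if p then pvGo r true else c :: pvGo r true) else c :: pvGo r false

-- the flag state after scanning a list
def pvSt : List String → Bool → Bool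
  | [], p => p
  | c :: r, _ => pvSt r (c == " ")

lemma pvGo_cons_space_true (c : String) (r : List String) (hc : c = " ") :
    pvGo (c :: r) true = pvGo r true := by simp [pvGo, hc]

lemma pvGo_cons_space_false (c : String) (r : List String) (hc : c = " ") :
    pvGo (c :: r) false = c :: pvGo r true := by simp [pvGo, hc]

lemma pvGo_cons_nonspace (c : String) (r : List String) (p : Bool) (hc : c ≠ " ") :
    pvGo (c :: r) p = c :: pvGo r false := by cases p <;> simp [pvGo, hc]

lemma pvFoldB (l : List String) : ∀ (acc : List String) (p : Bool),
    (l.foldl pvStepB (acc, p)).1 = acc ++ pvGo l p := by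
  induction l with
  | nil => intro acc p; simp [pvGo]
  | cons c r ih =>
    intro acc p
    by_cases hc : c = " "
    · cases p <;> simp [pvStepB, pvGo, hc, List.foldl_cons, ih]
    · simp [pvStepB, pvGo, hc, List.foldl_cons, ih]

lemma pvGetD_append_len (done : List String) (c : String) (r : List String) :
    (done ++ c :: r).getD done.length " " = c := by
  simp [List.getD]

lemma pvLoopA_go : ∀ (rest done : List String) (p : Bool),
    pvLoopA (done ++ rest) done.length (if p then "InWhiteSpace" else "InWord") =
      done ++ pvGo rest p := by
  intro rest
  induction rest with
  | nil =>
    intro done p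
    rw [pvLoopA]
    simp [pvGo]
  | cons c r ih =>
    intro done p
    rw [pvLoopA]
    have hlen : done.length < (done ++ c :: r).length := by simp
    have hget := pvGetD_append_len done c r
    cases p with
    | false =>
      simp only [hlen, dif_pos, hget]
      by_cases hc : c = " "
      · rw [if_pos hc]
        have := ih (done ++ [c]) true
        simp only [List.length_append, List.length_cons, List.length_nil] at this ⊢
        rw [show done ++ c :: r = (done ++ [c]) ++ r by simp, show done.length + 1 = done.length + 1 + 0 from rfl]
        simpa [pvGo, hc, List.append_assoc] using this
      · rw [if_neg hc]
        have := ih (done ++ [c]) false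
        simp only [List.length_append, List.length_cons, List.length_nil] at this ⊢
        rw [show done ++ c :: r = (done ++ [c]) ++ r by simp]
        simpa [pvGo, hc, List.append_assoc] using this
    | true =>
      simp only [reduceIte, hlen, dif_pos, hget]
      have hne : ("InWhiteSpace" : String) ≠ "InWord" := by decide
      rw [if_neg hne]
      by_cases hc : c = " "
      · rw [if_pos hc]
        have htake : (done ++ c :: r).take done.length = done := by
          simp
        have hdrop : (done ++ c :: r).drop (done.length + 1) = r := by
          rw [show done ++ c :: r = (done ++ [c]) ++ r by simp]
          simp
        rw [htake, hdrop]
        have := ih done true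
        simpa [pvGo, hc] using this
      · rw [if_neg hc]
        have := ih (done ++ [c]) false
        simp only [List.length_append, List.length_cons, List.length_nil] at this ⊢
        rw [show done ++ c :: r = (done ++ [c]) ++ r by simp]
        simpa [pvGo, hc, List.append_assoc] using this

-- trims

lemma pvLead_spec (l : List String) : ∀ acc : Int,
    pvLead l acc = acc + ((l.takeWhile (· == " ")).length : Int) := by
  induction l with
  | nil => intro acc; simp [pvLead]
  | cons c r ih =>
    intro acc
    by_cases hc : c = " "
    · simp [pvLead, hc, ih]; ring
    · simp [pvLead, hc]

lemma pvDropWhile_eq_drop (p : String → Bool) (l : List String) :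
    l.dropWhile p = l.drop (l.takeWhile p).length := by
  induction l with
  | nil => simp
  | cons c r ih =>
    by_cases hc : p c <;> simp [hc, ih]

lemma pvTrail_spec : ∀ (rev junk : List String) (tep : Int),
    pvTrail (rev.reverse ++ junk) ((rev.length : Int) - 1) tep =
      tep - ((rev.takeWhile (· == " ")).length : Int) := by
  intro rev
  induction rev with
  | nil => intro junk tep; rw [pvTrail]; simp
  | cons c r ih =>
    intro junk tep
    rw [pvTrail]
    have h0 : (0 : Int) ≤ ((c :: r).length : Int) - 1 := by simp
    rw [dif_pos h0]
    have htn : (((c :: r).length : Int) - 1).toNat = r.length := by simp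
    have harr : (c :: r).reverse ++ junk = r.reverse ++ (c :: junk) := by simp
    have hget : ((c :: r).reverse ++ junk).getD (((c :: r).length : Int) - 1).toNat " " = c := by
      rw [htn, harr, show r.length = r.reverse.length by simp]
      exact pvGetD_append_len r.reverse c junk
    rw [hget]
    by_cases hc : c = " "
    · rw [if_pos hc]
      have harg : ((c :: r).length : Int) - 1 - 1 = (r.length : Int) - 1 := by simp only [List.length_cons]; push_cast; ring
      rw [harr, harg, ih (c :: junk) (tep - 1)]
      simp [hc]
      ring
    · rw [if_neg hc]
      simp [hc]

-- facts about pvGo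

lemma pvGo_dropWhile_true (l : List String) :
    pvGo l true = pvGo (l.dropWhile (· == " ")) true := by
  induction l with
  | nil => simp
  | cons c r ih =>
    by_cases hc : c = " "
    · simp [pvGo, hc, ih]
    · simp [pvGo, hc]

lemma pvGo_true_eq_false (l : List String) (h : ∀ c, l.head? = some c → c ≠ " ") :
    pvGo l true = pvGo l false := by
  cases l with
  | nil => rfl
  | cons c r =>
    have hc : c ≠ " " := h c rfl
    simp [pvGo, hc]

lemma pvGo_append : ∀ (t s : List String) (p : Bool),
    pvGo (t ++ s) p = pvGo t p ++ pvGo s (pvSt t p) := by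
  intro t
  induction t with
  | nil => intro s p; simp [pvGo, pvSt]
  | cons c r ih =>
    intro s p
    by_cases hc : c = " "
    · cases p <;> simp [pvGo, pvSt, hc, ih]
    · have hb : (c == " ") = false := by simp [hc]
      simp [pvGo, pvSt, hc, hb, ih]

lemma pvGetLast?_cons_ne (c : String) (x : List String) (hx : x ≠ []) :
    (c :: x).getLast? = x.getLast? := by
  cases x with
  | nil => exact absurd rfl hx
  | cons d s => exact List.getLast?_cons_cons

lemma pvSt_false (t : List String) (p : Bool) (ht : t ≠ [])
    (hl : t.getLast? ≠ some " ") : pvSt t p = false := by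
  induction t generalizing p with
  | nil => exact absurd rfl ht
  | cons c r ih =>
    cases r with
    | nil =>
      simp only [List.getLast?_singleton, ne_eq, Option.some.injEq] at hl
      simp [pvSt, hl]
    | cons d s =>
      rw [List.getLast?_cons_cons] at hl
      exact ih (c == " ") (by simp) hl

lemma pvGo_allspace_true (s : List String) (h : ∀ x ∈ s, x = " ") :
    pvGo s true = [] := by
  induction s with
  | nil => rfl
  | cons c r ih =>
    have hc : c = " " := h c (by simp)
    simp [pvGo, hc, ih fun x hx => h x (by simp [hx])]

lemma pvGo_allspace_false (s : List String) (hne : s ≠ []) (h : ∀ x ∈ s, x = " ") :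
    pvGo s false = [" "] := by
  cases s with
  | nil => exact absurd rfl hne
  | cons c r =>
    have hc : c = " " := h c (by simp)
    simp [pvGo, hc, pvGo_allspace_true r fun x hx => h x (by simp [hx])]

lemma pvGo_last (t : List String) (p : Bool) (ht : t ≠ []) (hl : t.getLast? ≠ some " ") :
    pvGo t p ≠ [] ∧ (pvGo t p).getLast? ≠ some " " := by
  induction t generalizing p with
  | nil => exact absurd rfl ht
  | cons c r ih =>
    cases r with
    | nil =>
      simp only [List.getLast?_singleton, ne_eq, Option.some.injEq] at hl
      simp [pvGo, hl]
    | cons d s =>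
      rw [List.getLast?_cons_cons] at hl
      by_cases hc : c = " "
      · cases p with
        | true =>
          rw [pvGo_cons_space_true _ _ hc]
          exact ih true (by simp) hl
        | false =>
          have h2 := ih true (by simp) hl
          rw [pvGo_cons_space_false _ _ hc]
          refine ⟨by simp, ?_⟩
          rw [pvGetLast?_cons_ne _ _ h2.1]
          exact h2.2
      · have h2 := ih false (by simp) hl
        rw [pvGo_cons_nonspace _ _ _ hc]
        refine ⟨by simp, ?_⟩
        rw [pvGetLast?_cons_ne _ _ h2.1]
        exact h2.2

lemma pvHead_dropWhile (p : String → Bool) (l : List String) (c : String)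
    (h : (l.dropWhile p).head? = some c) : p c = false := by
  induction l with
  | nil => simp at h
  | cons d r ih =>
    by_cases hd : p d
    · rw [List.dropWhile_cons, if_pos hd] at h; exact ih h
    · rw [List.dropWhile_cons, if_neg hd] at h
      simp at h
      simpa [← h] using hd

-- A computes pvGo on the trimmed list
lemma pvA_eq (words : List String) :
    pre_treatment words =
      pvGo ((words.dropWhile (· == " ")).rdropWhile (· == " ")) false := by
  simp only [pre_treatment]
  set L := words.dropWhile (· == " ") with hL
  have hlead : pvLead words (-1) + 1 = ((words.takeWhile (· == " ")).length : Int) := by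
    rw [pvLead_spec]; ring
  rw [hlead, PySem.List.slice_from _ (by positivity)]
  have hw1 : words.drop (((words.takeWhile (· == " ")).length : Int)).toNat = L := by
    rw [Int.toNat_natCast, hL, pvDropWhile_eq_drop]
  rw [hw1]
  have htrail := pvTrail_spec L.reverse [] ((L.length : Int))
  simp only [List.reverse_reverse, List.append_nil, List.length_reverse] at htrail
  rw [htrail]
  set kt := (L.reverse.takeWhile (· == " ")).length with hkt
  have hktle : kt ≤ L.length := by
    simpa [hkt] using (List.takeWhile_sublist (l := L.reverse) (· == " ")).length_le
  rw [PySem.List.slice_to _ (by omega)]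
  have hw2 : L.take (((L.length : Int) - (kt : Int))).toNat = L.rdropWhile (· == " ") := by
    have : (((L.length : Int) - (kt : Int))).toNat = L.length - kt := by omega
    rw [this, List.rdropWhile, pvDropWhile_eq_drop, ← hkt,
      List.reverse_drop]
    simp
  rw [hw2]
  set t := L.rdropWhile (· == " ") with ht
  by_cases h0 : t.length = 0
  · rw [if_pos h0]
    rw [List.length_eq_zero_iff] at h0
    simp [h0, pvGo]
  · rw [if_neg h0]
    simpa using pvLoopA_go t [] false

-- B computes the same
lemma pvB_eq (words : List String) :
    pre_treatment_alt words =
      pvGo ((words.dropWhile (· == " ")).rdropWhile (· == " ")) false := by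
  simp only [pre_treatment_alt]
  rw [pvFoldB words [] true, List.nil_append]
  set L := words.dropWhile (· == " ") with hL
  have hhead : ∀ c, L.head? = some c → c ≠ " " := by
    intro c hc hcs
    have := pvHead_dropWhile (· == " ") words c hc
    simp [hcs] at this
  have h1 : pvGo words true = pvGo L false := by
    rw [pvGo_dropWhile_true, ← hL, pvGo_true_eq_false L hhead]
  rw [h1]
  set t := L.rdropWhile (· == " ") with ht
  set sf := L.rtakeWhile (· == " ") with hsf
  have hsplit : L = t ++ sf := by
    rw [ht, hsf, List.rdropWhile_append_rtakeWhile]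
  have hsfall : ∀ x ∈ sf, x = " " := by
    intro x hx
    have := List.mem_rtakeWhile_imp hx
    simpa using this
  by_cases htn : t = []
  · -- then L is all spaces; but L's head is not a space, so L = []
    have hLall : ∀ x ∈ L, x = " " := by
      intro x hx
      rw [hsplit, htn, List.nil_append] at hx
      exact hsfall x hx
    have hLnil : L = [] := by
      cases hLe : L with
      | nil => rfl
      | cons c r =>
        have : c ≠ " " := hhead c (by rw [hLe]; rfl)
        exact absurd (hLall c (by rw [hLe]; simp)) this
    have hsfnil : sf = [] := by
      have := hsplit; rw [hLnil, htn, List.nil_append] at this; exact this.symm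
    rw [hLnil, htn]
    simp [pvGo]
  · have hlt : t.getLast? ≠ some " " := by
      intro hc
      rw [ht, List.rdropWhile, List.getLast?_reverse] at hc
      have := pvHead_dropWhile (· == " ") L.reverse " " hc
      simp at this
    have hst : pvSt t false = false := pvSt_false t false htn hlt
    rw [hsplit, pvGo_append, hst]
    have hgl := pvGo_last t false htn hlt
    by_cases hsfn : sf = []
    · rw [hsfn]
      simp only [pvGo, List.append_nil]
      cases hgo : (pvGo t false).getLast? with
      | none => rfl
      | some c =>
        have : c ≠ " " := by intro hcs; rw [hcs] at hgo; exact hgl.2 hgo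
        simp [this]
    · rw [pvGo_allspace_false sf hsfn hsfall]
      have : (pvGo t false ++ [" "]).getLast? = some " " := by simp
      rw [this]
      simp

-- ===== VERDICT (by name: the statement is the Claim_ definition above) =====
theorem pre_treatment_spec : Claim_equal_pre_treatment := by
  intro words _
  unfold Spec_pre_treatment
  rw [pvA_eq, pvB_eq]
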